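-- pv_equiv track=rewrite | github.com/Rachel-commits/advent-of-code | 2022/22_monkey_map.py | wrap_check
-- ===== SOURCE A (Python) =====
-- def wrap_check(direction, temp_pos,tiles, walls, x_max,y_max):
--     """
--     For part 1 work out the wrap position and check of blocked
--     """
--     ## check  x coords from left
--     if direction == 0:
--         for i in range(x_max):
--             i+=1
--             if (i,temp_pos[1]) in tiles:
--                 return (i,temp_pos[1]) ,'move'
--             elif (i,temp_pos[1]) in walls:
--                 return (i,temp_pos[1]) , 'blocked'
--
--     # check y coords from above
--     elif direction == 1:
--         for i in range(y_max):
--             i+=1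
--             if (temp_pos[0], i) in tiles:
--                 return (temp_pos[0], i)  ,'move'
--             elif (temp_pos[0], i)  in walls:
--                 return (temp_pos[0], i)  , 'blocked'
--
--     ## check  x coords from right
--     elif direction == 2:
--         for i in range(x_max):
--             if (x_max -i,temp_pos[1]) in tiles:
--                 return (x_max -i,temp_pos[1]) ,'move'
--             elif (x_max -i,temp_pos[1]) in walls:
--                 return (x_max -i,temp_pos[1]) , 'blocked'
--
--     ## check  y coords from bottom
--     elif direction == 3:
--         for i in range(y_max):
--             if (temp_pos[0], y_max -i) in tiles:
--                 return (temp_pos[0], y_max -i) ,'move'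
--             elif (temp_pos[0], y_max -i) in walls:
--                 return (temp_pos[0], y_max -i) , 'blocked'
-- ===== SOURCE B (Python) =====
-- def wrap_check(direction, temp_pos, tiles, walls, x_max, y_max):
--     """
--     Pick the extreme occupied cell on the line directly, instead of scanning
--     every coordinate from the edge.
--     """
--     if direction == 0 or direction == 2:
--         fixed, limit = temp_pos[1], x_max
--         occ = [p for p in list(tiles) + list(walls)
--                if p[1] == fixed and 1 <= p[0] <= limit]
--         if not occ:
--             return None
--         coords = [p[0] for p in occ]
--         coord = min(coords) if direction == 0 else max(coords)
--         cell = (coord, fixed)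
--     elif direction == 1 or direction == 3:
--         fixed, limit = temp_pos[0], y_max
--         occ = [p for p in list(tiles) + list(walls)
--                if p[0] == fixed and 1 <= p[1] <= limit]
--         if not occ:
--             return None
--         coords = [p[1] for p in occ]
--         coord = min(coords) if direction == 1 else max(coords)
--         cell = (fixed, coord)
--     else:
--         return None
--     return cell, ('move' if cell in tiles else 'blocked')
-- ===== Notes on version B (the rewrite author's own statement) =====
-- stated objective: alternative
-- what changed: Instead of scanning every coordinate 1..max from the grid edge and testing membership at each step, B filters the occupied cells (tiles+walls) lying on the relevant line once and takes the min/max coordinate of that set.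
import Mathlib
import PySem

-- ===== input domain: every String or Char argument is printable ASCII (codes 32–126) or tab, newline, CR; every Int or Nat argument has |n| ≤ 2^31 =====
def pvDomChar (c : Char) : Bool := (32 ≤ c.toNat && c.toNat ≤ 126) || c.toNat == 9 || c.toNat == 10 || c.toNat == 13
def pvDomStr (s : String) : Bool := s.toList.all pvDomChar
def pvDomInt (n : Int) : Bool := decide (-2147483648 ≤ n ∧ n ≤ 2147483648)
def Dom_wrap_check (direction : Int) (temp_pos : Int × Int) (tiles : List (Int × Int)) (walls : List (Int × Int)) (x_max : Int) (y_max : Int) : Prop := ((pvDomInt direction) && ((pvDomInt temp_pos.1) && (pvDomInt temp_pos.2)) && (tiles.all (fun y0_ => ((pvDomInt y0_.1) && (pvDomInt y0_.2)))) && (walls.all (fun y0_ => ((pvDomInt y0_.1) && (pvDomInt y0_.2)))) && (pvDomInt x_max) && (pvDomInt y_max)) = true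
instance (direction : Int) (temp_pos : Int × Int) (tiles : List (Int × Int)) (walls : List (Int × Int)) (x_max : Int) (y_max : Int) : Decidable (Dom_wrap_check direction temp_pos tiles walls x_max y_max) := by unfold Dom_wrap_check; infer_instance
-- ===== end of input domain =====

-- B replaces A's coordinate-by-coordinate scan from the grid edge by filtering the
-- occupied cells on the line once and taking the extreme coordinate (objective: alternative; same result by a different traversal).

-- ===== PORT A =====
-- A's `for i in range(x_max): i += 1; …` loop for direction 0 (scan x from the left)
def pvLoopA0 (tiles walls : List (Int × Int)) (y : Int) : List Int → Option ((Int × Int) × String)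
  | [] => none
  | i :: rest =>
    if (i + 1, y) ∈ tiles then some ((i + 1, y), "move")
    else if (i + 1, y) ∈ walls then some ((i + 1, y), "blocked")
    else pvLoopA0 tiles walls y rest

-- direction 1 (scan y from above)
def pvLoopA1 (tiles walls : List (Int × Int)) (x : Int) : List Int → Option ((Int × Int) × String)
  | [] => none
  | i :: rest =>
    if (x, i + 1) ∈ tiles then some ((x, i + 1), "move")
    else if (x, i + 1) ∈ walls then some ((x, i + 1), "blocked")
    else pvLoopA1 tiles walls x rest

-- direction 2 (scan x from the right: candidate x_max - i)
def pvLoopA2 (tiles walls : List (Int × Int)) (y x_max : Int) : List Int → Option ((Int × Int) × String)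
  | [] => none
  | i :: rest =>
    if (x_max - i, y) ∈ tiles then some ((x_max - i, y), "move")
    else if (x_max - i, y) ∈ walls then some ((x_max - i, y), "blocked")
    else pvLoopA2 tiles walls y x_max rest

-- direction 3 (scan y from the bottom: candidate y_max - i)
def pvLoopA3 (tiles walls : List (Int × Int)) (x y_max : Int) : List Int → Option ((Int × Int) × String)
  | [] => none
  | i :: rest =>
    if (x, y_max - i) ∈ tiles then some ((x, y_max - i), "move")
    else if (x, y_max - i) ∈ walls then some ((x, y_max - i), "blocked")
    else pvLoopA3 tiles walls x y_max rest

def wrap_check (direction : Int) (temp_pos : Int × Int) (tiles : List (Int × Int)) (walls : List (Int × Int)) (x_max : Int) (y_max : Int) : Option ((Int × Int) × String) :=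
  if direction = 0 then pvLoopA0 tiles walls temp_pos.2 (PySem.List.pyRange 0 x_max 1)
  else if direction = 1 then pvLoopA1 tiles walls temp_pos.1 (PySem.List.pyRange 0 y_max 1)
  else if direction = 2 then pvLoopA2 tiles walls temp_pos.2 x_max (PySem.List.pyRange 0 x_max 1)
  else if direction = 3 then pvLoopA3 tiles walls temp_pos.1 y_max (PySem.List.pyRange 0 y_max 1)
  else none

-- ===== PORT B =====
def wrap_check_alt (direction : Int) (temp_pos : Int × Int) (tiles : List (Int × Int)) (walls : List (Int × Int)) (x_max : Int) (y_max : Int) : Option ((Int × Int) × String) :=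
  if direction = 0 ∨ direction = 2 then
    let fixed := temp_pos.2
    let occ := (tiles ++ walls).filter (fun p => p.2 == fixed && decide (1 ≤ p.1) && decide (p.1 ≤ x_max))
    let coords := occ.map Prod.fst
    match (if direction = 0 then PySem.List.min? coords (fun v => v) else PySem.List.max? coords (fun v => v)) with
    | none => none    -- `if not occ: return None` — min/max of the empty line
    | some c =>
      let cell := (c, fixed)
      some (cell, if cell ∈ tiles then "move" else "blocked")
  else if direction = 1 ∨ direction = 3 then
    let fixed := temp_pos.1
    let occ := (tiles ++ walls).filter (fun p => p.1 == fixed && decide (1 ≤ p.2) && decide (p.2 ≤ y_max))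
    let coords := occ.map Prod.snd
    match (if direction = 1 then PySem.List.min? coords (fun v => v) else PySem.List.max? coords (fun v => v)) with
    | none => none
    | some c =>
      let cell := (fixed, c)
      some (cell, if cell ∈ tiles then "move" else "blocked")
  else none

-- ===== PRECONDITION & SPEC =====
def Spec_wrap_check (direction : Int) (temp_pos : Int × Int) (tiles : List (Int × Int)) (walls : List (Int × Int)) (x_max : Int) (y_max : Int) (out : Option ((Int × Int) × String)) : Prop := out = wrap_check_alt direction temp_pos tiles walls x_max y_max
instance (direction : Int) (temp_pos : Int × Int) (tiles : List (Int × Int)) (walls : List (Int × Int)) (x_max : Int) (y_max : Int) (out : Option ((Int × Int) × String)) : Decidable (Spec_wrap_check direction temp_pos tiles walls x_max y_max out) := by unfold Spec_wrap_check; infer_instance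

-- ===== CLAIM (what is proved, stated in full; the proofs are below) =====
def Claim_equal_wrap_check : Prop := ∀ (direction : Int) (temp_pos : Int × Int) (tiles : List (Int × Int)) (walls : List (Int × Int)) (x_max : Int) (y_max : Int), Dom_wrap_check direction temp_pos tiles walls x_max y_max → Spec_wrap_check direction temp_pos tiles walls x_max y_max (wrap_check direction temp_pos tiles walls x_max y_max)

-- ===== LEMMAS AND PROOFS =====

-- B's x-line computation with a general lower bound lo (at lo = 1 it is B's dir-0/2 branch)
def pvPickX (tiles walls : List (Int × Int)) (y lo hi : Int) (useMin : Bool) : Option ((Int × Int) × String) :=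
  match (if useMin
         then PySem.List.min? (((tiles ++ walls).filter (fun p => p.2 == y && decide (lo ≤ p.1) && decide (p.1 ≤ hi))).map Prod.fst) (fun v => v)
         else PySem.List.max? (((tiles ++ walls).filter (fun p => p.2 == y && decide (lo ≤ p.1) && decide (p.1 ≤ hi))).map Prod.fst) (fun v => v)) with
  | none => none
  | some c => some ((c, y), if (c, y) ∈ tiles then "move" else "blocked")

def pvPickY (tiles walls : List (Int × Int)) (x lo hi : Int) (useMin : Bool) : Option ((Int × Int) × String) :=
  match (if useMin
         then PySem.List.min? (((tiles ++ walls).filter (fun p => p.1 == x && decide (lo ≤ p.2) && decide (p.2 ≤ hi))).map Prod.snd) (fun v => v)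
         else PySem.List.max? (((tiles ++ walls).filter (fun p => p.1 == x && decide (lo ≤ p.2) && decide (p.2 ≤ hi))).map Prod.snd) (fun v => v)) with
  | none => none
  | some c => some ((x, c), if (x, c) ∈ tiles then "move" else "blocked")

lemma pvMemCoordsX {tiles walls : List (Int × Int)} {y lo hi v : Int} :
    v ∈ (((tiles ++ walls).filter (fun p => p.2 == y && decide (lo ≤ p.1) && decide (p.1 ≤ hi))).map Prod.fst)
      ↔ ((v, y) ∈ tiles ∨ (v, y) ∈ walls) ∧ lo ≤ v ∧ v ≤ hi := by
  simp only [List.mem_map, List.mem_filter, List.mem_append]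
  constructor
  · rintro ⟨⟨px, py⟩, ⟨hmem, hf⟩, rfl⟩
    simp only [beq_iff_eq, Bool.and_eq_true, decide_eq_true_eq] at hf
    obtain ⟨⟨h1, h2⟩, h3⟩ := hf
    subst h1; exact ⟨hmem, h2, h3⟩
  · rintro ⟨hmem, h2, h3⟩
    exact ⟨(v, y), ⟨hmem, by simp [h2, h3]⟩, rfl⟩

lemma pvMemCoordsY {tiles walls : List (Int × Int)} {x lo hi v : Int} :
    v ∈ (((tiles ++ walls).filter (fun p => p.1 == x && decide (lo ≤ p.2) && decide (p.2 ≤ hi))).map Prod.snd)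
      ↔ ((x, v) ∈ tiles ∨ (x, v) ∈ walls) ∧ lo ≤ v ∧ v ≤ hi := by
  simp only [List.mem_map, List.mem_filter, List.mem_append]
  constructor
  · rintro ⟨⟨px, py⟩, ⟨hmem, hf⟩, rfl⟩
    simp only [beq_iff_eq, Bool.and_eq_true, decide_eq_true_eq] at hf
    obtain ⟨⟨h1, h2⟩, h3⟩ := hf
    subst h1; exact ⟨hmem, h2, h3⟩
  · rintro ⟨hmem, h2, h3⟩
    exact ⟨(x, v), ⟨hmem, by simp [h2, h3]⟩, rfl⟩

lemma pvMinEq (xs : List Int) (v : Int) (hv : v ∈ xs) (hmin : ∀ u ∈ xs, v ≤ u) :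
    PySem.List.min? xs (fun x => x) = some v := by
  cases h : PySem.List.min? xs (fun x => x) with
  | none => rw [PySem.List.min?_eq_none_iff] at h; simp [h] at hv
  | some m =>
    have hm := PySem.List.min?_mem h
    have h1 := PySem.List.min?_isMin h v hv
    have h2 := hmin m hm
    simp only [Option.some.injEq]; omega

lemma pvMaxEq (xs : List Int) (v : Int) (hv : v ∈ xs) (hmax : ∀ u ∈ xs, u ≤ v) :
    PySem.List.max? xs (fun x => x) = some v := by
  cases h : PySem.List.max? xs (fun x => x) with
  | none => rw [PySem.List.max?_eq_none_iff] at h; simp [h] at hv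
  | some m =>
    have hm := PySem.List.max?_mem h
    have h1 := PySem.List.max?_isMax h v hv
    have h2 := hmax m hm
    simp only [Option.some.injEq]; omega

lemma pvPickX_none (tiles walls : List (Int × Int)) (y lo hi : Int) (b : Bool) (h : hi < lo) :
    pvPickX tiles walls y lo hi b = none := by
  have hc : (((tiles ++ walls).filter (fun p => p.2 == y && decide (lo ≤ p.1) && decide (p.1 ≤ hi))).map Prod.fst) = [] := by
    rw [List.eq_nil_iff_forall_not_mem]
    intro v hv; rw [pvMemCoordsX] at hv; omega
  unfold pvPickX
  rw [hc]
  cases b <;> rfl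

lemma pvPickY_none (tiles walls : List (Int × Int)) (x lo hi : Int) (b : Bool) (h : hi < lo) :
    pvPickY tiles walls x lo hi b = none := by
  have hc : (((tiles ++ walls).filter (fun p => p.1 == x && decide (lo ≤ p.2) && decide (p.2 ≤ hi))).map Prod.snd) = [] := by
    rw [List.eq_nil_iff_forall_not_mem]
    intro v hv; rw [pvMemCoordsY] at hv; omega
  unfold pvPickY
  rw [hc]
  cases b <;> rfl

lemma pvPickX_shrink_lo (tiles walls : List (Int × Int)) (y lo hi : Int) (b : Bool)
    (hnt : (lo, y) ∉ tiles) (hnw : (lo, y) ∉ walls) :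
    pvPickX tiles walls y lo hi b = pvPickX tiles walls y (lo + 1) hi b := by
  unfold pvPickX
  have hf : (tiles ++ walls).filter (fun p => p.2 == y && decide (lo ≤ p.1) && decide (p.1 ≤ hi))
      = (tiles ++ walls).filter (fun p => p.2 == y && decide (lo + 1 ≤ p.1) && decide (p.1 ≤ hi)) := by
    apply List.filter_congr
    rintro ⟨a, c⟩ hp
    by_cases hc : c = y
    · subst hc
      by_cases ha : a = lo
      · subst ha
        rw [List.mem_append] at hp
        rcases hp with hp | hp
        · exact absurd hp hnt
        · exact absurd hp hnw
      · have hd : decide (lo ≤ a) = decide (lo + 1 ≤ a) := decide_eq_decide.mpr (by omega)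
        simp only [hd]
    · have hby : (_ == _) = false := beq_eq_false_iff_ne.mpr hc
      simp only [hby, Bool.false_and]
  rw [hf]

lemma pvPickX_shrink_hi (tiles walls : List (Int × Int)) (y lo hi : Int) (b : Bool)
    (hnt : (hi, y) ∉ tiles) (hnw : (hi, y) ∉ walls) :
    pvPickX tiles walls y lo hi b = pvPickX tiles walls y lo (hi - 1) b := by
  unfold pvPickX
  have hf : (tiles ++ walls).filter (fun p => p.2 == y && decide (lo ≤ p.1) && decide (p.1 ≤ hi))
      = (tiles ++ walls).filter (fun p => p.2 == y && decide (lo ≤ p.1) && decide (p.1 ≤ hi - 1)) := by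
    apply List.filter_congr
    rintro ⟨a, c⟩ hp
    by_cases hc : c = y
    · subst hc
      by_cases ha : a = hi
      · subst ha
        rw [List.mem_append] at hp
        rcases hp with hp | hp
        · exact absurd hp hnt
        · exact absurd hp hnw
      · have hd : decide (a ≤ hi) = decide (a ≤ hi - 1) := decide_eq_decide.mpr (by omega)
        simp only [hd]
    · have hby : (_ == _) = false := beq_eq_false_iff_ne.mpr hc
      simp only [hby, Bool.false_and]
  rw [hf]

lemma pvPickY_shrink_lo (tiles walls : List (Int × Int)) (x lo hi : Int) (b : Bool)
    (hnt : (x, lo) ∉ tiles) (hnw : (x, lo) ∉ walls) :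
    pvPickY tiles walls x lo hi b = pvPickY tiles walls x (lo + 1) hi b := by
  unfold pvPickY
  have hf : (tiles ++ walls).filter (fun p => p.1 == x && decide (lo ≤ p.2) && decide (p.2 ≤ hi))
      = (tiles ++ walls).filter (fun p => p.1 == x && decide (lo + 1 ≤ p.2) && decide (p.2 ≤ hi)) := by
    apply List.filter_congr
    rintro ⟨a, c⟩ hp
    by_cases hc : a = x
    · subst hc
      by_cases hb2 : c = lo
      · subst hb2
        rw [List.mem_append] at hp
        rcases hp with hp | hp
        · exact absurd hp hnt
        · exact absurd hp hnw
      · have hd : decide (lo ≤ c) = decide (lo + 1 ≤ c) := decide_eq_decide.mpr (by omega)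
        simp only [hd]
    · have hby : (_ == _) = false := beq_eq_false_iff_ne.mpr hc
      simp only [hby, Bool.false_and]
  rw [hf]

lemma pvPickY_shrink_hi (tiles walls : List (Int × Int)) (x lo hi : Int) (b : Bool)
    (hnt : (x, hi) ∉ tiles) (hnw : (x, hi) ∉ walls) :
    pvPickY tiles walls x lo hi b = pvPickY tiles walls x lo (hi - 1) b := by
  unfold pvPickY
  have hf : (tiles ++ walls).filter (fun p => p.1 == x && decide (lo ≤ p.2) && decide (p.2 ≤ hi))
      = (tiles ++ walls).filter (fun p => p.1 == x && decide (lo ≤ p.2) && decide (p.2 ≤ hi - 1)) := by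
    apply List.filter_congr
    rintro ⟨a, c⟩ hp
    by_cases hc : a = x
    · subst hc
      by_cases hb2 : c = hi
      · subst hb2
        rw [List.mem_append] at hp
        rcases hp with hp | hp
        · exact absurd hp hnt
        · exact absurd hp hnw
      · have hd : decide (c ≤ hi) = decide (c ≤ hi - 1) := decide_eq_decide.mpr (by omega)
        simp only [hd]
    · have hby : (_ == _) = false := beq_eq_false_iff_ne.mpr hc
      simp only [hby, Bool.false_and]
  rw [hf]

-- dir 0: scanning x = lo+1, lo+2, …, hi equals taking the minimal occupied coord in [lo+1, hi]
lemma pvLoopA0_eq_pick (tiles walls : List (Int × Int)) (y : Int) (hi : Int) :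
    ∀ lo : Int, pvLoopA0 tiles walls y (PySem.List.pyRange lo hi 1) = pvPickX tiles walls y (lo + 1) hi true := by
  suffices H : ∀ n : Nat, ∀ lo : Int, (hi - lo).toNat ≤ n → pvLoopA0 tiles walls y (PySem.List.pyRange lo hi 1) = pvPickX tiles walls y (lo + 1) hi true from
    fun lo => H (hi - lo).toNat lo le_rfl
  intro n
  induction n with
  | zero =>
    intro lo hle
    rw [PySem.List.pyRange_one_eq_nil (by omega), pvPickX_none _ _ _ _ _ _ (by omega)]
    rfl
  | succ n ih =>
    intro lo hle
    by_cases hlt : lo < hi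
    · rw [PySem.List.pyRange_one_cons hlt]
      by_cases ht : ((lo + 1 : Int), y) ∈ tiles
      · simp only [pvLoopA0, if_pos ht]
        have hmem : (lo + 1) ∈ (((tiles ++ walls).filter (fun p => p.2 == y && decide (lo + 1 ≤ p.1) && decide (p.1 ≤ hi))).map Prod.fst) :=
          pvMemCoordsX.mpr ⟨Or.inl ht, by omega, by omega⟩
        have hminv : ∀ u ∈ (((tiles ++ walls).filter (fun p => p.2 == y && decide (lo + 1 ≤ p.1) && decide (p.1 ≤ hi))).map Prod.fst), lo + 1 ≤ u := by
          intro u hu; rw [pvMemCoordsX] at hu; omega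
        unfold pvPickX
        rw [pvMinEq _ _ hmem hminv]
        simp [ht]
      · by_cases hw : ((lo + 1 : Int), y) ∈ walls
        · simp only [pvLoopA0, if_neg ht, if_pos hw]
          have hmem : (lo + 1) ∈ (((tiles ++ walls).filter (fun p => p.2 == y && decide (lo + 1 ≤ p.1) && decide (p.1 ≤ hi))).map Prod.fst) :=
            pvMemCoordsX.mpr ⟨Or.inr hw, by omega, by omega⟩
          have hminv : ∀ u ∈ (((tiles ++ walls).filter (fun p => p.2 == y && decide (lo + 1 ≤ p.1) && decide (p.1 ≤ hi))).map Prod.fst), lo + 1 ≤ u := by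
            intro u hu; rw [pvMemCoordsX] at hu; omega
          unfold pvPickX
          rw [pvMinEq _ _ hmem hminv]
          simp [ht]
        · simp only [pvLoopA0, if_neg ht, if_neg hw]
          rw [ih (lo + 1) (by omega), pvPickX_shrink_lo _ _ _ _ _ _ ht hw]
    · rw [PySem.List.pyRange_one_eq_nil (by omega), pvPickX_none _ _ _ _ _ _ (by omega)]
      rfl

lemma pvLoopA1_eq_pick (tiles walls : List (Int × Int)) (x : Int) (hi : Int) :
    ∀ lo : Int, pvLoopA1 tiles walls x (PySem.List.pyRange lo hi 1) = pvPickY tiles walls x (lo + 1) hi true := by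
  suffices H : ∀ n : Nat, ∀ lo : Int, (hi - lo).toNat ≤ n → pvLoopA1 tiles walls x (PySem.List.pyRange lo hi 1) = pvPickY tiles walls x (lo + 1) hi true from
    fun lo => H (hi - lo).toNat lo le_rfl
  intro n
  induction n with
  | zero =>
    intro lo hle
    rw [PySem.List.pyRange_one_eq_nil (by omega), pvPickY_none _ _ _ _ _ _ (by omega)]
    rfl
  | succ n ih =>
    intro lo hle
    by_cases hlt : lo < hi
    · rw [PySem.List.pyRange_one_cons hlt]
      by_cases ht : (x, (lo + 1 : Int)) ∈ tiles
      · simp only [pvLoopA1, if_pos ht]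
        have hmem : (lo + 1) ∈ (((tiles ++ walls).filter (fun p => p.1 == x && decide (lo + 1 ≤ p.2) && decide (p.2 ≤ hi))).map Prod.snd) :=
          pvMemCoordsY.mpr ⟨Or.inl ht, by omega, by omega⟩
        have hminv : ∀ u ∈ (((tiles ++ walls).filter (fun p => p.1 == x && decide (lo + 1 ≤ p.2) && decide (p.2 ≤ hi))).map Prod.snd), lo + 1 ≤ u := by
          intro u hu; rw [pvMemCoordsY] at hu; omega
        unfold pvPickY
        rw [pvMinEq _ _ hmem hminv]
        simp [ht]
      · by_cases hw : (x, (lo + 1 : Int)) ∈ walls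
        · simp only [pvLoopA1, if_neg ht, if_pos hw]
          have hmem : (lo + 1) ∈ (((tiles ++ walls).filter (fun p => p.1 == x && decide (lo + 1 ≤ p.2) && decide (p.2 ≤ hi))).map Prod.snd) :=
            pvMemCoordsY.mpr ⟨Or.inr hw, by omega, by omega⟩
          have hminv : ∀ u ∈ (((tiles ++ walls).filter (fun p => p.1 == x && decide (lo + 1 ≤ p.2) && decide (p.2 ≤ hi))).map Prod.snd), lo + 1 ≤ u := by
            intro u hu; rw [pvMemCoordsY] at hu; omega
          unfold pvPickY
          rw [pvMinEq _ _ hmem hminv]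
          simp [ht]
        · simp only [pvLoopA1, if_neg ht, if_neg hw]
          rw [ih (lo + 1) (by omega), pvPickY_shrink_lo _ _ _ _ _ _ ht hw]
    · rw [PySem.List.pyRange_one_eq_nil (by omega), pvPickY_none _ _ _ _ _ _ (by omega)]
      rfl

-- dir 2: scanning x = hi - lo, …, 1 equals taking the maximal occupied coord in [1, hi - lo]
lemma pvLoopA2_eq_pick (tiles walls : List (Int × Int)) (y : Int) (hi : Int) :
    ∀ lo : Int, pvLoopA2 tiles walls y hi (PySem.List.pyRange lo hi 1) = pvPickX tiles walls y 1 (hi - lo) false := by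
  suffices H : ∀ n : Nat, ∀ lo : Int, (hi - lo).toNat ≤ n → pvLoopA2 tiles walls y hi (PySem.List.pyRange lo hi 1) = pvPickX tiles walls y 1 (hi - lo) false from
    fun lo => H (hi - lo).toNat lo le_rfl
  intro n
  induction n with
  | zero =>
    intro lo hle
    rw [PySem.List.pyRange_one_eq_nil (by omega), pvPickX_none _ _ _ _ _ _ (by omega)]
    rfl
  | succ n ih =>
    intro lo hle
    by_cases hlt : lo < hi
    · rw [PySem.List.pyRange_one_cons hlt]
      by_cases ht : ((hi - lo : Int), y) ∈ tiles
      · simp only [pvLoopA2, if_pos ht]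
        have hmem : (hi - lo) ∈ (((tiles ++ walls).filter (fun p => p.2 == y && decide (1 ≤ p.1) && decide (p.1 ≤ hi - lo))).map Prod.fst) :=
          pvMemCoordsX.mpr ⟨Or.inl ht, by omega, by omega⟩
        have hmaxv : ∀ u ∈ (((tiles ++ walls).filter (fun p => p.2 == y && decide (1 ≤ p.1) && decide (p.1 ≤ hi - lo))).map Prod.fst), u ≤ hi - lo := by
          intro u hu; rw [pvMemCoordsX] at hu; omega
        unfold pvPickX
        rw [pvMaxEq _ _ hmem hmaxv]
        simp [ht]
      · by_cases hw : ((hi - lo : Int), y) ∈ walls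
        · simp only [pvLoopA2, if_neg ht, if_pos hw]
          have hmem : (hi - lo) ∈ (((tiles ++ walls).filter (fun p => p.2 == y && decide (1 ≤ p.1) && decide (p.1 ≤ hi - lo))).map Prod.fst) :=
            pvMemCoordsX.mpr ⟨Or.inr hw, by omega, by omega⟩
          have hmaxv : ∀ u ∈ (((tiles ++ walls).filter (fun p => p.2 == y && decide (1 ≤ p.1) && decide (p.1 ≤ hi - lo))).map Prod.fst), u ≤ hi - lo := by
            intro u hu; rw [pvMemCoordsX] at hu; omega
          unfold pvPickX
          rw [pvMaxEq _ _ hmem hmaxv]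
          simp [ht]
        · simp only [pvLoopA2, if_neg ht, if_neg hw]
          rw [ih (lo + 1) (by omega), pvPickX_shrink_hi _ _ _ _ _ _ ht hw,
            show hi - (lo + 1) = hi - lo - 1 by ring]
    · rw [PySem.List.pyRange_one_eq_nil (by omega), pvPickX_none _ _ _ _ _ _ (by omega)]
      rfl

lemma pvLoopA3_eq_pick (tiles walls : List (Int × Int)) (x : Int) (hi : Int) :
    ∀ lo : Int, pvLoopA3 tiles walls x hi (PySem.List.pyRange lo hi 1) = pvPickY tiles walls x 1 (hi - lo) false := by
  suffices H : ∀ n : Nat, ∀ lo : Int, (hi - lo).toNat ≤ n → pvLoopA3 tiles walls x hi (PySem.List.pyRange lo hi 1) = pvPickY tiles walls x 1 (hi - lo) false from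
    fun lo => H (hi - lo).toNat lo le_rfl
  intro n
  induction n with
  | zero =>
    intro lo hle
    rw [PySem.List.pyRange_one_eq_nil (by omega), pvPickY_none _ _ _ _ _ _ (by omega)]
    rfl
  | succ n ih =>
    intro lo hle
    by_cases hlt : lo < hi
    · rw [PySem.List.pyRange_one_cons hlt]
      by_cases ht : (x, (hi - lo : Int)) ∈ tiles
      · simp only [pvLoopA3, if_pos ht]
        have hmem : (hi - lo) ∈ (((tiles ++ walls).filter (fun p => p.1 == x && decide (1 ≤ p.2) && decide (p.2 ≤ hi - lo))).map Prod.snd) :=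
          pvMemCoordsY.mpr ⟨Or.inl ht, by omega, by omega⟩
        have hmaxv : ∀ u ∈ (((tiles ++ walls).filter (fun p => p.1 == x && decide (1 ≤ p.2) && decide (p.2 ≤ hi - lo))).map Prod.snd), u ≤ hi - lo := by
          intro u hu; rw [pvMemCoordsY] at hu; omega
        unfold pvPickY
        rw [pvMaxEq _ _ hmem hmaxv]
        simp [ht]
      · by_cases hw : (x, (hi - lo : Int)) ∈ walls
        · simp only [pvLoopA3, if_neg ht, if_pos hw]
          have hmem : (hi - lo) ∈ (((tiles ++ walls).filter (fun p => p.1 == x && decide (1 ≤ p.2) && decide (p.2 ≤ hi - lo))).map Prod.snd) :=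
            pvMemCoordsY.mpr ⟨Or.inr hw, by omega, by omega⟩
          have hmaxv : ∀ u ∈ (((tiles ++ walls).filter (fun p => p.1 == x && decide (1 ≤ p.2) && decide (p.2 ≤ hi - lo))).map Prod.snd), u ≤ hi - lo := by
            intro u hu; rw [pvMemCoordsY] at hu; omega
          unfold pvPickY
          rw [pvMaxEq _ _ hmem hmaxv]
          simp [ht]
        · simp only [pvLoopA3, if_neg ht, if_neg hw]
          rw [ih (lo + 1) (by omega), pvPickY_shrink_hi _ _ _ _ _ _ ht hw,
            show hi - (lo + 1) = hi - lo - 1 by ring]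
    · rw [PySem.List.pyRange_one_eq_nil (by omega), pvPickY_none _ _ _ _ _ _ (by omega)]
      rfl

-- ===== VERDICT (by name: the statement is the Claim_ definition above) =====
theorem wrap_check_spec : Claim_equal_wrap_check := by
  intro direction temp_pos tiles walls x_max y_max _
  unfold Spec_wrap_check wrap_check wrap_check_alt
  by_cases h0 : direction = 0
  · simp only [h0]
    have := pvLoopA0_eq_pick tiles walls temp_pos.2 x_max 0
    simpa [pvPickX] using this
  · by_cases h1 : direction = 1
    · simp only [h1]
      have := pvLoopA1_eq_pick tiles walls temp_pos.1 y_max 0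
      simpa [pvPickY] using this
    · by_cases h2 : direction = 2
      · simp only [h2]
        have := pvLoopA2_eq_pick tiles walls temp_pos.2 x_max 0
        simpa [pvPickX] using this
      · by_cases h3 : direction = 3
        · simp only [h3]
          have := pvLoopA3_eq_pick tiles walls temp_pos.1 y_max 0
          simpa [pvPickY] using this
        · simp [h0, h1, h2, h3]
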